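-- pv_equiv track=rewrite | github.com/joshanashakya/dissertation | workspace/dataset/java-python/GeeksForGeeks/2445/A/2.py | previousNumber
-- ===== SOURCE A (Python) =====
-- def previousNumber(num1):
--     n = len(num1);
--     num = list(num1);
--
--     # if the number is '1'
--     if (num1 == "1"):
--         return "0";
--     i = n - 1;
--
--     # examine bits from right to left
--     while (i >= 0):
--
--         # if '1' is encountered, convert
--         # it to '0' and then break
--         if (num[i] == '1'):
--             num[i] = '0';
--             break;
--
--         # else convert '0' to '1'
--         else:
--             num[i] = '1';
--         i -= 1;
--
--     # if only the 1st bit in the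
--     # binary representation was '1'
--     if (i == 0):
--         return num[1:n];
--
--     # final binary representation
--     # of the required number
--     return '' . join(num);
-- ===== SOURCE B (Python) =====
-- def previousNumber(num1):
--     if num1 == "1":
--         return "0"
--     p = num1.rfind('1')
--     if p == -1:
--         return '1' * len(num1)
--     res = num1[:p] + '0' + '1' * (len(num1) - p - 1)
--     return res[1:] if p == 0 else res
-- ===== Notes on version B (the rewrite author's own statement) =====
-- stated objective: simpler
-- what changed: Replaces the char-by-char right-to-left mutating loop over a list copy with a single rfind of the rightmost '1' and direct assembly of the result from slices and a replicated suffix.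
-- outside the precondition, e.g. on previousNumber('10'): A returns ['1'], B returns '1'; on previousNumber('100'): A returns ['1', '1'], B returns '11'
import Mathlib
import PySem

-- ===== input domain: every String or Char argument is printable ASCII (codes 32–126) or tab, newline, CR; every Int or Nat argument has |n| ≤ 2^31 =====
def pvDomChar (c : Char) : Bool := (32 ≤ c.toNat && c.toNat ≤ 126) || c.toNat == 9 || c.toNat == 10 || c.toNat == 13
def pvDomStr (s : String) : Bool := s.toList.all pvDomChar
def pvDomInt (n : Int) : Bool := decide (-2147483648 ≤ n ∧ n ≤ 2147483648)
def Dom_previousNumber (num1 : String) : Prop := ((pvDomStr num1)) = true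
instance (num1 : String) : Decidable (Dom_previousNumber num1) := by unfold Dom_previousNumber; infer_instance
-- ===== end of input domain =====

-- B replaces A's right-to-left mutating loop with rfind-the-rightmost-'1' plus direct slice assembly (simpler decomposition, same cost).


-- ===== PORT A =====
-- A's while loop: scan index i from the right, turn non-'1' chars into '1',
-- turn the first '1' met into '0' and stop; returns the final list and final i.
def pvALoop (num : List Char) (i : Int) : List Char × Int :=
  if _h : 0 ≤ i then
    if (PySem.List.pyGet? num i).getD ' ' = '1' then
      (num.set i.toNat '0', i)
    else
      pvALoop (num.set i.toNat '1') (i - 1)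
  else (num, i)
termination_by (i + 1).toNat
decreasing_by omega

def previousNumber (num1 : String) : String :=
  let n : Int := (num1.toList.length : Int)
  let num := num1.toList
  if num1 = "1" then "0"
  else
    let r := pvALoop num (n - 1)
    -- Python's `return num[1:n]` here yields a LIST, not a str (outside Pre_);
    -- rendered as the corresponding string.
    if r.2 = 0 then String.ofList (r.1.drop 1)
    else String.ofList r.1

-- ===== PORT B =====
-- str.rfind(c): index of the last occurrence, -1 if absent.
def pvRfind (l : List Char) (c : Char) : Int :=
  match l.reverse.findIdx? (· = c) with
  | none => -1
  | some j => (l.length : Int) - 1 - (j : Int)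

def previousNumber_alt (num1 : String) : String :=
  if num1 = "1" then "0"
  else
    let s := num1.toList
    let p := pvRfind s '1'
    if p = -1 then String.ofList (List.replicate s.length '1')
    else
      let res := s.take p.toNat ++ '0' :: List.replicate (s.length - p.toNat - 1) '1'
      if p = 0 then String.ofList (res.drop 1) else String.ofList res

-- ===== PRECONDITION & SPEC =====
-- Pre_ excludes strings (other than "1") whose first character is '1' and which contain
-- no other '1': there A's `return num[1:n]` returns a list of characters, not a string.
def Pre_previousNumber (num1 : String) : Prop :=
  num1 = "1" ∨ num1.toList.headD ' ' ≠ '1' ∨ '1' ∈ num1.toList.tail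
instance (num1 : String) : Decidable (Pre_previousNumber num1) := by
  unfold Pre_previousNumber; infer_instance
def pvWitness_previousNumber : String := "110"
def Spec_previousNumber (num1 : String) (out : String) : Prop := out = previousNumber_alt num1
instance (num1 : String) (out : String) : Decidable (Spec_previousNumber num1 out) := by unfold Spec_previousNumber; infer_instance

-- ===== CLAIM (what is proved, stated in full; the proofs are below) =====
def Claim_equal_previousNumber : Prop := ∀ (num1 : String), Dom_previousNumber num1 → Pre_previousNumber num1 → Spec_previousNumber num1 (previousNumber num1)

-- ===== LEMMAS AND PROOFS =====

theorem set_append_len {α : Type} (xs : List α) (y v : α) (ys : List α) :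
    (xs ++ y :: ys).set xs.length v = xs ++ v :: ys := by
  induction xs with
  | nil => simp
  | cons a t ih => simp [ih]

-- A's loop on a '1'-free prefix: every scanned char becomes '1', i ends at -1.
theorem pvALoop_no_one (ys zs : List Char) (h : '1' ∉ ys) :
    pvALoop (ys ++ zs) ((ys.length : Int) - 1)
      = (List.replicate ys.length '1' ++ zs, -1) := by
  induction ys using List.reverseRecOn generalizing zs with
  | nil => simp [pvALoop]
  | append_singleton ys₀ c ih =>
      have hc : c ≠ '1' := by rintro rfl; exact h (by simp)
      have h0 : '1' ∉ ys₀ := fun hm => h (by simp [hm])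
      have hL : (ys₀ ++ [c]) ++ zs = ys₀ ++ c :: zs := by simp
      have hi : ((ys₀ ++ [c]).length : Int) - 1 = (ys₀.length : Int) := by simp
      rw [hL, hi, pvALoop, dif_pos (Int.natCast_nonneg _),
        PySem.List.pyGet?_append_length]
      simp only [Option.getD_some]
      rw [if_neg hc, Int.toNat_natCast, set_append_len, ih ('1' :: zs) h0]
      simp [List.replicate_succ']

-- A's loop when the scanned region is xs ++ '1' :: ys with no '1' in ys:
-- the ys-part becomes all '1', the '1' becomes '0', i stops at xs.length.
theorem pvALoop_split (xs ys zs : List Char) (h : '1' ∉ ys) :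
    pvALoop (xs ++ '1' :: ys ++ zs) ((xs.length : Int) + ys.length)
      = (xs ++ '0' :: List.replicate ys.length '1' ++ zs, (xs.length : Int)) := by
  induction ys using List.reverseRecOn generalizing zs with
  | nil =>
      have hi : (xs.length : Int) + (([] : List Char).length : Int) = (xs.length : Int) := by simp
      have hL : xs ++ '1' :: ([] : List Char) ++ zs = xs ++ '1' :: zs := by simp
      rw [hL, hi, pvALoop, dif_pos (Int.natCast_nonneg _),
        PySem.List.pyGet?_append_length]
      simp only [Option.getD_some, if_true]
      rw [Int.toNat_natCast, set_append_len]
      simp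
  | append_singleton ys₀ c ih =>
      have hc : c ≠ '1' := by rintro rfl; exact h (by simp)
      have h0 : '1' ∉ ys₀ := fun hm => h (by simp [hm])
      have hi : (xs.length : Int) + ((ys₀ ++ [c]).length : Int) = ((xs ++ '1' :: ys₀).length : Int) := by
        simp
      have hL : xs ++ '1' :: (ys₀ ++ [c]) ++ zs = (xs ++ '1' :: ys₀) ++ c :: zs := by simp
      rw [hL, hi, pvALoop, dif_pos (Int.natCast_nonneg _),
        PySem.List.pyGet?_append_length]
      simp only [Option.getD_some]
      rw [if_neg hc, Int.toNat_natCast, set_append_len]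
      have hi2 : ((xs ++ '1' :: ys₀).length : Int) - 1 = (xs.length : Int) + (ys₀.length : Int) := by
        simp; omega
      have hL2 : (xs ++ '1' :: ys₀) ++ '1' :: zs = xs ++ '1' :: ys₀ ++ '1' :: zs := by simp
      rw [hi2, hL2, ih ('1' :: zs) h0]
      simp [List.replicate_succ', List.append_assoc]

theorem findIdx?_reverse_no_one (ys : List Char) (h : '1' ∉ ys) :
    ys.reverse.findIdx? (· = '1') = none := by
  rw [List.findIdx?_eq_none_iff]
  intro x hx
  simp only [List.mem_reverse] at hx
  simp only [decide_eq_false_iff_not]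
  rintro rfl; exact h hx

theorem pvRfind_no_one (l : List Char) (h : '1' ∉ l) : pvRfind l '1' = -1 := by
  unfold pvRfind
  rw [findIdx?_reverse_no_one l h]

theorem pvRfind_split (xs ys : List Char) (h : '1' ∉ ys) :
    pvRfind (xs ++ '1' :: ys) '1' = (xs.length : Int) := by
  unfold pvRfind
  have hrev : (xs ++ '1' :: ys).reverse = ys.reverse ++ '1' :: xs.reverse := by simp
  have hfind : (ys.reverse ++ '1' :: xs.reverse).findIdx? (· = '1') = some ys.reverse.length := by
    rw [List.findIdx?_append, findIdx?_reverse_no_one ys h]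
    simp [List.findIdx?_cons]
  rw [hrev, hfind]
  simp; omega

theorem exists_last_split (l : List Char) (h : '1' ∈ l) :
    ∃ xs ys, l = xs ++ '1' :: ys ∧ '1' ∉ ys := by
  induction l using List.reverseRecOn with
  | nil => simp at h
  | append_singleton l₀ c ih =>
      by_cases hc : c = '1'
      · exact ⟨l₀, [], by simp [hc], by simp⟩
      · have hl : '1' ∈ l₀ := by
          rcases List.mem_append.mp h with h1 | h1
          · exact h1
          · simp at h1; exact absurd h1.symm hc
        obtain ⟨xs, ys, heq, hys⟩ := ih hl
        exact ⟨xs, ys ++ [c], by simp [heq], by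
          simp [hys]; exact fun h' => hc h'.symm⟩

-- ===== VERDICT (by name: the statement is the Claim_ definition above) =====
theorem previousNumber_spec : Claim_equal_previousNumber := by
  intro num1 _hdom hpre
  unfold Spec_previousNumber previousNumber previousNumber_alt
  by_cases h1 : num1 = "1"
  · simp [h1]
  · rw [if_neg h1, if_neg h1]
    by_cases hmem : '1' ∈ num1.toList
    · obtain ⟨xs, ys, heq, hys⟩ := exists_last_split _ hmem
      have hxs : xs ≠ [] := by
        intro hnil
        rcases hpre with hp | hp | hp
        · exact h1 hp
        · rw [heq, hnil] at hp; simp at hp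
        · rw [heq, hnil] at hp; simp at hp; exact hys hp
      have h3 : (num1.toList.length : Int) - 1 = (xs.length : Int) + (ys.length : Int) := by
        rw [heq]; simp; omega
      have hsplit := pvALoop_split xs ys [] hys
      simp only [List.append_nil] at hsplit
      rw [h3, heq, hsplit]
      have hxslen : (xs.length : Int) ≠ 0 := by
        simp only [ne_eq, Int.natCast_eq_zero, List.length_eq_zero_iff]
        exact hxs
      simp only [hxslen, if_false]
      rw [pvRfind_split xs ys hys]
      have hne1 : (xs.length : Int) ≠ -1 := by omega
      rw [if_neg hne1, if_neg hxslen]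
      congr 1
      rw [Int.toNat_natCast]
      have htake : (xs ++ '1' :: ys).take xs.length = xs := List.take_left
      have hlen : (xs ++ '1' :: ys).length - xs.length - 1 = ys.length := by simp
      rw [htake, hlen]
    · have hno := pvALoop_no_one num1.toList [] hmem
      simp only [List.append_nil] at hno
      rw [hno]
      have hne : (-1 : Int) ≠ 0 := by decide
      simp only [hne, if_false]
      rw [pvRfind_no_one _ hmem, if_pos rfl]
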